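-- pv_equiv track=rewrite | github.com/SleepyOrga/semantic-chunking-platform | ai-services/xlsx_docx_parser/parser_docx.py | process_markdown_with_s3_images
-- ===== SOURCE A (Python) =====
-- def process_markdown_with_s3_images(markdown_content, image_mapping, s3_image_urls):
--     """Process markdown content with S3 URLs - leverages existing process_markdown_with_images logic"""
--     if not s3_image_urls:
--         # Fall back to existing function
--         return process_markdown_with_images(markdown_content, image_mapping)
--
--     # Use same logic as existing function but with S3 URLs
--     modified_content = markdown_content
--
--     # Replace placeholders with S3 URLs instead of local paths
--     for rel_id, image_filename in image_mapping.items():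
--         if image_filename in s3_image_urls:
--             s3_url = s3_image_urls[image_filename]
--             image_ref = f"![{image_filename}]({s3_url})"
--             modified_content = modified_content.replace("<!-- image -->", image_ref, 1)
--
--     # Remove remaining placeholders (same as existing function)
--     modified_content = modified_content.replace("<!-- image -->", "")
--
--     # Add remaining images (same logic as existing function but with S3 URLs)
--     remaining_images = [img for img in s3_image_urls.keys() if f"![{img}]" not in modified_content]
--     if remaining_images:
--         modified_content += "\n\n## Additional Extracted Images\n\n"
--         for img_filename in remaining_images:
--             s3_url = s3_image_urls[img_filename]
--             modified_content += f"![{img_filename}]({s3_url})\n\n"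
--
--     return modified_content
--
-- def process_markdown_with_images(markdown_content, image_mapping):
--     if not image_mapping:
--         return markdown_content
--
--     modified_content = markdown_content
--     image_list = list(image_mapping.values())
--
--     for i, image_filename in enumerate(image_list):
--         image_ref = f"![{image_filename}](images/{image_filename})"
--         modified_content = modified_content.replace("<!-- image -->", image_ref, 1)
--
--     modified_content = modified_content.replace("<!-- image -->", "")
--
--     remaining_images = image_list[modified_content.count("!["):]
--     if remaining_images:
--         modified_content += "\n\n## Additional Extracted Images\n\n"
--         for img_file in remaining_images:
--             modified_content += f"![{img_file}](images/{img_file})\n\n"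
--
--     return modified_content
-- ===== SOURCE B (Python) =====
-- PLACEHOLDER = "<!-- image -->"
--
-- def process_markdown_with_s3_images(markdown_content, image_mapping, s3_image_urls):
--     """Split/join re-implementation: split on the placeholder token, fill the
--     first placeholders with the matched refs in order, drop the rest; a ref whose
--     text itself contains the placeholder token is inserted verbatim."""
--     if not s3_image_urls:
--         # Fall back to the (re-implemented) existing function
--         return process_markdown_with_images(markdown_content, image_mapping)
--
--     refs = [f"![{v}]({s3_image_urls[v]})" for v in image_mapping.values() if v in s3_image_urls]
--     segments = markdown_content.split(PLACEHOLDER)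
--     out = [segments[0]]
--     rit = iter(refs)
--     for seg in segments[1:]:
--         out.append(next(rit, "") + seg)
--     modified_content = "".join(out)
--
--     # Add remaining images (kept verbatim from the existing logic)
--     remaining_images = [img for img in s3_image_urls.keys() if f"![{img}]" not in modified_content]
--     if remaining_images:
--         modified_content += "\n\n## Additional Extracted Images\n\n"
--         for img_filename in remaining_images:
--             s3_url = s3_image_urls[img_filename]
--             modified_content += f"![{img_filename}]({s3_url})\n\n"
--
--     return modified_content
--
-- def process_markdown_with_images(markdown_content, image_mapping):
--     # same split/join strategy as above (B's re-implementation of the fallback)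
--     if not image_mapping:
--         return markdown_content
--
--     image_list = list(image_mapping.values())
--     refs = [f"![{fn}](images/{fn})" for fn in image_list]
--     segments = markdown_content.split(PLACEHOLDER)
--     out = [segments[0]]
--     rit = iter(refs)
--     for seg in segments[1:]:
--         out.append(next(rit, "") + seg)
--     modified_content = "".join(out)
--
--     remaining_images = image_list[modified_content.count("!["):]
--     if remaining_images:
--         modified_content += "\n\n## Additional Extracted Images\n\n"
--         for img_file in remaining_images:
--             modified_content += f"![{img_file}](images/{img_file})\n\n"
--
--     return modified_content
-- ===== Notes on version B (the rewrite author's own statement) =====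
-- stated objective: alternative
-- what changed: Replaces the per-image replace('<!-- image -->', ref, 1) passes and the final strip-all replace by one split of the document on the placeholder token followed by a single join that fills the first placeholders with the refs in order and drops the rest, in both the S3 path and the empty-s3 fallback; the remaining-images appendix logic is kept verbatim. …
import Mathlib
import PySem

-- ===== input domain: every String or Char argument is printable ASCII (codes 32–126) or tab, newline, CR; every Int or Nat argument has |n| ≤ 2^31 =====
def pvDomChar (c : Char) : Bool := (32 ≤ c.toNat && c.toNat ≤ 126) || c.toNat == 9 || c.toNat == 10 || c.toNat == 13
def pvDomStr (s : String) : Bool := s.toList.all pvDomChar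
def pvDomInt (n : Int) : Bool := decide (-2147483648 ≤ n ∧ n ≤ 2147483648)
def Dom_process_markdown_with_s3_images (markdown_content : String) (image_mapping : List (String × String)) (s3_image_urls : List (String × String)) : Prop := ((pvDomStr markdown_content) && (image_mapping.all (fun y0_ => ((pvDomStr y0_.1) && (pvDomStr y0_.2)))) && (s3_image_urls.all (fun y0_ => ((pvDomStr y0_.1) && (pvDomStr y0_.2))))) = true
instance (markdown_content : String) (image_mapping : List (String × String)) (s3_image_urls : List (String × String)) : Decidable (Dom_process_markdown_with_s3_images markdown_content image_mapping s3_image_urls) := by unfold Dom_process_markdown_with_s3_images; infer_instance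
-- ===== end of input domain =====

-- B replaces A's repeated replace("<!-- image -->", ref, 1) passes by one split on the
-- placeholder and a single rejoin that fills the first placeholders with the refs in order;
-- fallback branch and the remaining-images appendix are kept verbatim (shared helpers below).

-- the placeholder token, as a list of code points
def phL : List Char := "<!-- image -->".toList

-- f"![{v}]({u})"
def refL (v u : String) : List Char :=
  "![".toList ++ v.toList ++ "](".toList ++ u.toList ++ ")".toList

-- f"![{fn}](images/{fn})"
def refImg (fn : String) : List Char :=
  "![".toList ++ fn.toList ++ "](images/".toList ++ fn.toList ++ ")".toList

def headerL : List Char := "\n\n## Additional Extracted Images\n\n".toList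

-- hand port of s.replace("<!-- image -->", r, 1): exact for this nonempty `old`
-- (replaces the leftmost occurrence, if any)
def replace1 (s r : List Char) : List Char :=
  let i := PySem.Chars.find s phL
  if i = -1 then s else s.take i.toNat ++ r ++ s.drop (i.toNat + phL.length)

-- the Python dicts arrive as association lists; dict(pairs): later duplicate keys
-- overwrite the value, the first occurrence keeps the position (PySem.Dict.insert fold)
def pvDict (l : List (String × String)) : PySem.Dict String String :=
  l.foldl (fun d q => d.insert q.1 q.2) (PySem.Dict.mk [])

-- the remaining-images block, identical lines in A and in B (hence one shared helper):
-- remaining = [img for img in s3.keys() if f"![{img}]" not in m]; append header + refs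
def finishS3 (d3 : PySem.Dict String String) (m : List Char) : List Char :=
  let remaining := d3.keys.filter
    (fun img => !(PySem.Chars.isIn ("![".toList ++ img.toList ++ "]".toList) m))
  if remaining.isEmpty then m
  else remaining.foldl (fun acc img => acc ++ refL img (d3.getD img "") ++ "\n\n".toList)
        (m ++ headerL)

-- tail of process_markdown_with_images (count-based remaining + appendix),
-- identical lines in A's and B's fallback, hence one shared helper
def finishImgs (imageList : List String) (m2 : List Char) : String :=
  let remaining := imageList.drop (PySem.Chars.count m2 "![".toList)
  if remaining.isEmpty then String.mk m2
  else String.mk (remaining.foldl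
    (fun acc fn => acc ++ refImg fn ++ "\n\n".toList)
    (m2 ++ headerL))

-- port of A's process_markdown_with_images (the fallback A delegates to)
def pmwi (markdown_content : String) (image_mapping : List (String × String)) : String :=
  if image_mapping.isEmpty then markdown_content
  else
    let imageList := (pvDict image_mapping).values
    let m1 := imageList.foldl (fun m fn => replace1 m (refImg fn)) markdown_content.toList
    let m2 := PySem.Chars.replace m1 phL []
    finishImgs imageList m2

-- ===== PORT A =====
def process_markdown_with_s3_images (markdown_content : String) (image_mapping : List (String × String)) (s3_image_urls : List (String × String)) : String :=
  if s3_image_urls.isEmpty then pmwi markdown_content image_mapping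
  else
    let d3 := pvDict s3_image_urls
    let m1 := (pvDict image_mapping).items.foldl
      (fun m q => if d3.contains q.2 then replace1 m (refL q.2 (d3.getD q.2 "")) else m)
      markdown_content.toList
    let m2 := PySem.Chars.replace m1 phL []
    String.mk (finishS3 d3 m2)

-- ===== PORT B =====
-- the rejoin loop of B: walk the later segments, consuming one ref (or "") per segment
def fillStep (st : List Char × List (List Char)) (seg : List Char) : List Char × List (List Char) :=
  match st with
  | (out, []) => (out ++ seg, [])
  | (out, r :: rt) => (out ++ r ++ seg, rt)

def fillB (segs : List (List Char)) (refs : List (List Char)) : List Char :=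
  match segs with
  | [] => []          -- unreachable: str.split never returns an empty list
  | s0 :: rest => (rest.foldl fillStep (s0, refs)).1

-- port of B's split/join re-implementation of process_markdown_with_images
def pmwiB (markdown_content : String) (image_mapping : List (String × String)) : String :=
  if image_mapping.isEmpty then markdown_content
  else
    let imageList := (pvDict image_mapping).values
    let refs := imageList.map refImg
    let m2 := fillB (PySem.Chars.splitOn markdown_content.toList phL) refs
    finishImgs imageList m2

def process_markdown_with_s3_images_alt (markdown_content : String) (image_mapping : List (String × String)) (s3_image_urls : List (String × String)) : String :=
  if s3_image_urls.isEmpty then pmwiB markdown_content image_mapping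
  else
    let d3 := pvDict s3_image_urls
    let refs := ((pvDict image_mapping).values.filter (fun v => d3.contains v)).map
      (fun v => refL v (d3.getD v ""))
    let m2 := fillB (PySem.Chars.splitOn markdown_content.toList phL) refs
    String.mk (finishS3 d3 m2)

-- ===== PRECONDITION & SPEC =====
-- Pre_ excludes the inputs on which some inserted image ref (a matched f"![{v}]({url})", or
-- f"![{v}](images/{v})" in the empty-s3 fallback) itself contains the literal placeholder
-- token while the markdown contains that token: what a replacement whose inserted text
-- contains the very token being replaced should mean is a corner no caller specifies, and
-- A's value there (its loop re-scans from the start, so it re-matches inside the inserted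
-- ref and later strips the token out of it) and B's (the ref inserted verbatim) are both
-- defensible.
def Pre_process_markdown_with_s3_images (markdown_content : String) (image_mapping : List (String × String)) (s3_image_urls : List (String × String)) : Prop :=
  ¬ (PySem.Str.isIn "<!-- image -->" markdown_content = true ∧
    ((∃ p ∈ image_mapping, ∃ q ∈ s3_image_urls, q.1 = p.2 ∧
        PySem.Str.isIn "<!-- image -->" ("![" ++ p.2 ++ "](" ++ q.2 ++ ")") = true) ∨
     (s3_image_urls = [] ∧ ∃ p ∈ image_mapping,
        PySem.Str.isIn "<!-- image -->" ("![" ++ p.2 ++ "](images/" ++ p.2 ++ ")") = true)))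
instance (markdown_content : String) (image_mapping : List (String × String)) (s3_image_urls : List (String × String)) : Decidable (Pre_process_markdown_with_s3_images markdown_content image_mapping s3_image_urls) := by unfold Pre_process_markdown_with_s3_images; infer_instance

def pvWitness_process_markdown_with_s3_images : String × (List (String × String)) × (List (String × String)) :=
  ("a <!-- image --> b", [("1", "v")], [("v", "http://u")])

def Spec_process_markdown_with_s3_images (markdown_content : String) (image_mapping : List (String × String)) (s3_image_urls : List (String × String)) (out : String) : Prop := out = process_markdown_with_s3_images_alt markdown_content image_mapping s3_image_urls
instance (markdown_content : String) (image_mapping : List (String × String)) (s3_image_urls : List (String × String)) (out : String) : Decidable (Spec_process_markdown_with_s3_images markdown_content image_mapping s3_image_urls out) := by unfold Spec_process_markdown_with_s3_images; infer_instance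

-- ===== CLAIM (what is proved, stated in full; the proofs are below) =====
def Claim_equal_process_markdown_with_s3_images : Prop := ∀ (markdown_content : String) (image_mapping : List (String × String)) (s3_image_urls : List (String × String)), Dom_process_markdown_with_s3_images markdown_content image_mapping s3_image_urls → Pre_process_markdown_with_s3_images markdown_content image_mapping s3_image_urls → Spec_process_markdown_with_s3_images markdown_content image_mapping s3_image_urls (process_markdown_with_s3_images markdown_content image_mapping s3_image_urls)

-- ===== LEMMAS AND PROOFS =====

theorem phL_len : phL.length = 14 := by decide
theorem find_nil_phL : PySem.Chars.find [] phL = -1 := by decide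

-- the first-occurrence spine both Chars.replace and Chars.splitOn reduce to
def mySplit (s : List Char) : List (List Char) :=
  if h : PySem.Chars.find s phL = -1 then [s]
  else
    s.take (PySem.Chars.find s phL).toNat ::
      mySplit (s.drop ((PySem.Chars.find s phL).toNat + 14))
termination_by s.length
decreasing_by
  have hs : s ≠ [] := by rintro rfl; exact h find_nil_phL
  simp only [List.length_drop]
  exact Nat.sub_lt (List.length_pos_of_ne_nil hs) (by omega)

theorem mySplit_ne_nil (s : List Char) : mySplit s ≠ [] := by
  rw [mySplit]; split <;> simp

theorem mySplit_neg (s : List Char) (h : PySem.Chars.find s phL = -1) :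
    mySplit s = [s] := by
  rw [mySplit, dif_pos h]

theorem mySplit_pos (s : List Char) (j : Nat) (h : PySem.Chars.find s phL = (j : Int)) :
    mySplit s = s.take j :: mySplit (s.drop (j + 14)) := by
  rw [mySplit, dif_neg (by rw [h]; omega), h]
  simp

theorem mySplit_exists_cons (s : List Char) :
    ∃ h0 t0, mySplit s = h0 :: t0 := by
  rcases hX : mySplit s with _ | ⟨h0, t0⟩
  · exact absurd hX (mySplit_ne_nil _)
  · exact ⟨h0, t0, rfl⟩

theorem drop_app_ge (l₁ l₂ : List Char) (n : Nat) (h : l₁.length ≤ n) :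
    (l₁ ++ l₂).drop n = l₂.drop (n - l₁.length) := by
  have hn : n = l₁.length + (n - l₁.length) := by omega
  rw [hn, List.drop_length_add_append]
  congr 1
  omega

-- "no occurrence" phrased positionally
theorem noocc_iff (x : List Char) :
    PySem.Chars.find x phL = -1 ↔ ∀ i, ¬ phL <+: x.drop i := by
  rw [PySem.Chars.find_eq_neg_one_iff]
  constructor
  · intro h i hp
    exact h (List.infix_iff_prefix_suffix.mpr ⟨_, hp, List.drop_suffix _ _⟩)
  · rintro h ⟨a, b, rfl⟩
    refine h a.length ?_
    rw [List.append_assoc, List.drop_left]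
    exact List.prefix_append _ _

-- find points at a stated first occurrence
theorem find_at (a b s : List Char) (hs : s = a ++ phL ++ b)
    (hmin : ∀ i < a.length, ¬ phL <+: s.drop i) :
    PySem.Chars.find s phL = (a.length : Int) := by
  have hin : phL <:+: s := ⟨a, b, hs.symm⟩
  have hne : PySem.Chars.find s phL ≠ -1 := by
    intro he
    rw [PySem.Chars.find_eq_neg_one_iff] at he
    exact he hin
  have h1 : -1 ≤ PySem.Chars.find s phL := PySem.Chars.neg_one_le_find s phL
  have h0 : 0 ≤ PySem.Chars.find s phL := by omega
  obtain ⟨hpre, hminf⟩ := PySem.Chars.find_spec h0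
  have hdr : phL <+: s.drop a.length := by
    rw [hs, List.append_assoc, List.drop_left]; exact List.prefix_append _ _
  rcases lt_trichotomy (PySem.Chars.find s phL).toNat a.length with hlt | heq | hgt
  · exact absurd hpre (hmin _ hlt)
  · omega
  · exact absurd hdr (hminf _ hgt)

theorem find_decomp (s : List Char) (h : PySem.Chars.find s phL ≠ -1) :
    phL <+: s.drop (PySem.Chars.find s phL).toNat ∧
      ∀ i < (PySem.Chars.find s phL).toNat, ¬ phL <+: s.drop i := by
  have h1 : -1 ≤ PySem.Chars.find s phL := PySem.Chars.neg_one_le_find s phL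
  exact PySem.Chars.find_spec (by omega)

theorem prefix_drop_decomp (s : List Char) (j : Nat) (hp : phL <+: s.drop j) :
    s = s.take j ++ phL ++ s.drop (j + 14) := by
  obtain ⟨t, ht⟩ := hp
  have h1 : (phL ++ t).drop 14 = t := by
    conv_lhs => rw [← phL_len]
    exact List.drop_left
  rw [ht] at h1
  rw [List.drop_drop] at h1
  calc s = s.take j ++ s.drop j := (List.take_append_drop j s).symm
    _ = s.take j ++ (phL ++ t) := by rw [ht]
    _ = s.take j ++ phL ++ s.drop (j + 14) := by rw [← h1, List.append_assoc]

theorem prefix_split (p x y : List Char) (h : p <+: x ++ y) (hl : x.length ≤ p.length) :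
    x <+: p ∧ p.drop x.length <+: y := by
  obtain ⟨t, ht⟩ := h
  constructor
  · have h1 : (p ++ t).take x.length = (x ++ y).take x.length := by rw [ht]
    rw [List.take_append_of_le_length hl, List.take_left] at h1
    exact h1 ▸ List.take_prefix x.length p
  · have h2 : (p ++ t).drop x.length = (x ++ y).drop x.length := by rw [ht]
    rw [List.drop_append_of_le_length hl, List.drop_left] at h2
    exact ⟨t, h2⟩

theorem prefix_split' (p x y : List Char) (h : p <+: x ++ y) (hl : p.length ≤ x.length) :
    p <+: x := by
  obtain ⟨t, ht⟩ := h
  have h1 : (p ++ t).take p.length = (x ++ y).take p.length := by rw [ht]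
  rw [List.take_left, List.take_append_of_le_length hl] at h1
  exact h1 ▸ List.take_prefix p.length x

-- no occurrence of phL can start inside `pre`
def CleanPre (pre : List Char) : Prop :=
  ∀ i < pre.length, ¬ pre.drop i <+: phL ∧ ¬ phL <+: pre.drop i

theorem clean_no_start {pre : List Char} (hc : CleanPre pre) (b : List Char)
    (i : Nat) (hi : i < pre.length) : ¬ phL <+: (pre ++ b).drop i := by
  intro h
  rw [List.drop_append_of_le_length (le_of_lt hi)] at h
  rcases Nat.lt_or_ge (pre.drop i).length phL.length with hl | hl
  · exact (hc i hi).1 (prefix_split _ _ _ h (le_of_lt hl)).1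
  · exact (hc i hi).2 (prefix_split' _ _ _ h hl)

theorem refL_eq (v u : String) :
    refL v u = '!' :: '[' :: (v.toList ++ ']' :: '(' :: (u.toList ++ [')'])) := by
  show ((((['!', '['] ++ v.toList) ++ [']', '(']) ++ u.toList) ++ [')']) = _
  simp [List.append_assoc]

theorem refL_concat (v u : String) :
    refL v u = ("![".toList ++ v.toList ++ "](".toList ++ u.toList) ++ [')'] := rfl

theorem hbang : ∀ k, (h : k < phL.length) → phL[k] = '!' → k = 1 := by decide

theorem cleanPre_append (a : List Char) (v u : String)
    (ha : ∀ i < a.length, ¬ phL <+: a.drop i)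
    (hr : ¬ phL <:+: refL v u) : CleanPre (a ++ refL v u) := by
  set r := refL v u with hrdef
  intro i hi
  by_cases hia : i < a.length
  · rw [List.drop_append_of_le_length (le_of_lt hia)]
    constructor
    · intro h
      have hmem : '[' ∈ a.drop i ++ r := by
        refine List.mem_append_right _ ?_
        rw [hrdef, refL_eq]; simp
      exact absurd (h.mem hmem) (by decide)
    · intro h
      rcases Nat.lt_or_ge (a.drop i).length phL.length with hl | hl
      · obtain ⟨_, h2⟩ := prefix_split _ _ _ h (le_of_lt hl)
        set k := (a.drop i).length with hk
        have hk1 : 1 ≤ k := by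
          have : 0 < (a.drop i).length := by
            simp only [List.length_drop]; omega
          omega
        have hk14 : k < 14 := by rw [phL_len] at hl; omega
        have hdlen : (phL.drop k).length = 14 - k := by
          simp [List.length_drop, phL_len]
        have hrlen : 2 ≤ r.length := by rw [hrdef, refL_eq]; simp
        have h0 : phL[k]'(by rw [phL_len]; omega) = '!' := by
          have hg := h2.getElem (i := 0) (by rw [hdlen]; omega)
          simp only [List.getElem_drop] at hg
          simp only [hrdef, refL_eq, List.getElem_cons_zero] at hg
          simpa using hg
        have hk1' : k = 1 := hbang k (by rw [phL_len]; omega) h0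
        have hfalse : False := by
          have hg := h2.getElem (i := 1) (by rw [hdlen]; omega)
          simp only [List.getElem_drop] at hg
          simp only [hrdef, refL_eq, List.getElem_cons_succ, List.getElem_cons_zero] at hg
          simp only [hk1'] at hg
          have h2' : phL[2]'(by decide) = '[' := by simpa using hg
          exact absurd h2' (by decide)
        exact hfalse.elim
      · exact ha i hia (prefix_split' _ _ _ h hl)
  · push_neg at hia
    have hj : i - a.length < r.length := by
      have := hi; simp only [List.length_append] at this; omega
    have hdro : (a ++ r).drop i = r.drop (i - a.length) := drop_app_ge a r i hia
    rw [hdro]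
    constructor
    · intro h
      have hlr : r.length = ("![".toList ++ v.toList ++ "](".toList ++ u.toList).length + 1 := by
        rw [hrdef, refL_concat, List.length_append]
        simp
      have hmem : ')' ∈ r.drop (i - a.length) := by
        rw [hrdef, refL_concat]
        rw [List.drop_append_of_le_length (by rw [hlr] at hj; omega)]
        simp
      exact absurd (h.mem hmem) (by decide)
    · intro h
      exact hr (List.infix_iff_prefix_suffix.mpr ⟨_, h, List.drop_suffix _ _⟩)

-- prepend to the head segment
def preH (x : List Char) : List (List Char) → List (List Char)
  | [] => [x]
  | h :: t => (x ++ h) :: t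

theorem preH_preH (x y : List Char) (L : List (List Char)) :
    preH x (preH y L) = preH (x ++ y) L := by
  cases L <;> simp [preH, List.append_assoc]

theorem mySplit_cons (c : Char) (rest : List Char)
    (hp : phL.isPrefixOf (c :: rest) = false) :
    mySplit (c :: rest) = preH [c] (mySplit rest) := by
  have hnp : ¬ phL <+: (c :: rest) := by
    rw [← List.isPrefixOf_iff_prefix]; simp [hp]
  by_cases hr : PySem.Chars.find rest phL = -1
  · have hc : PySem.Chars.find (c :: rest) phL = -1 := by
      rw [noocc_iff]
      intro i
      cases i with
      | zero => simpa using hnp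
      | succ i' => simpa using (noocc_iff rest).mp hr i'
    rw [mySplit_neg _ hc, mySplit_neg _ hr]
    simp [preH]
  · obtain ⟨hjp, hjm⟩ := find_decomp rest hr
    set j := (PySem.Chars.find rest phL).toNat with hjdef
    have hjl : j ≤ rest.length := by
      have := PySem.Chars.find_le_length rest phL
      have h1 : -1 ≤ PySem.Chars.find rest phL := PySem.Chars.neg_one_le_find rest phL
      omega
    have hdec : rest = rest.take j ++ phL ++ rest.drop (j + 14) :=
      prefix_drop_decomp rest j hjp
    have hcfind : PySem.Chars.find (c :: rest) phL = ((j + 1 : Nat) : Int) := by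
      have := find_at (c :: rest.take j) (rest.drop (j + 14)) (c :: rest)
        (by rw [List.cons_append, List.cons_append]; exact congrArg (c :: ·) hdec)
        (by
          intro i hilt
          cases i with
          | zero => simpa using hnp
          | succ i' =>
            simp only [List.drop_succ_cons]
            have : i' < j := by
              simp only [List.length_cons, List.length_take] at hilt; omega
            exact hjm i' this)
      simpa [List.length_take, Nat.min_eq_left hjl] using this
    have hrfind : PySem.Chars.find rest phL = (j : Int) := by
      have h1 := PySem.Chars.neg_one_le_find rest phL
      rw [hjdef]; omega
    rw [mySplit_pos _ _ hcfind, mySplit_pos rest j hrfind]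
    rw [show j + 1 + 14 = (j + 14) + 1 from by omega]
    simp [preH, List.take_succ_cons, List.drop_succ_cons]

theorem splitOn_go_nil (fuel : Nat) (cur : List Char) (acc : List (List Char)) :
    PySem.Chars.splitOn.go phL (fuel + 1) [] cur acc = (cur.reverse :: acc).reverse := by
  simp [PySem.Chars.splitOn.go]

theorem splitOn_go_pos (fuel : Nat) (c : Char) (rest cur : List Char) (acc : List (List Char))
    (hp : phL.isPrefixOf (c :: rest) = true) :
    PySem.Chars.splitOn.go phL (fuel + 1) (c :: rest) cur acc
      = PySem.Chars.splitOn.go phL fuel ((c :: rest).drop phL.length) [] (cur.reverse :: acc) := by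
  rw [PySem.Chars.splitOn.go]; simp [hp]

theorem splitOn_go_neg (fuel : Nat) (c : Char) (rest cur : List Char) (acc : List (List Char))
    (hp : phL.isPrefixOf (c :: rest) = false) :
    PySem.Chars.splitOn.go phL (fuel + 1) (c :: rest) cur acc
      = PySem.Chars.splitOn.go phL fuel rest (c :: cur) acc := by
  rw [PySem.Chars.splitOn.go]; simp [hp]

theorem find_prefix_zero (c : Char) (rest : List Char)
    (hp : phL.isPrefixOf (c :: rest) = true) :
    PySem.Chars.find (c :: rest) phL = ((0 : Nat) : Int) := by
  have hdecomp : (c :: rest) = [] ++ phL ++ (c :: rest).drop phL.length := by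
    simpa using (List.prefix_iff_eq_append.mp (List.isPrefixOf_iff_prefix.mp hp)).symm
  have := find_at [] ((c :: rest).drop phL.length) (c :: rest) hdecomp
    (by intro i hi; simp at hi)
  simpa using this

theorem splitOn_go_eq (fuel : Nat) : ∀ (l cur : List Char) (acc : List (List Char)),
    l.length < fuel →
    PySem.Chars.splitOn.go phL fuel l cur acc = acc.reverse ++ preH cur.reverse (mySplit l) := by
  induction fuel with
  | zero => intro l cur acc h; omega
  | succ fuel ih =>
    intro l cur acc h
    match l with
    | [] =>
      rw [splitOn_go_nil]
      rw [mySplit_neg [] find_nil_phL]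
      simp [preH]
    | c :: rest =>
      by_cases hp : phL.isPrefixOf (c :: rest) = true
      · rw [splitOn_go_pos fuel c rest cur acc hp]
        rw [ih _ _ _ (by
          simp only [List.length_drop, phL_len, List.length_cons]
          simp only [List.length_cons] at h
          omega)]
        rw [mySplit_pos _ 0 (find_prefix_zero c rest hp)]
        rw [phL_len]
        simp only [List.take_zero, Nat.zero_add]
        obtain ⟨h0, t0, hX⟩ := mySplit_exists_cons ((c :: rest).drop 14)
        rw [hX]
        simp [preH]
      · have hp' : phL.isPrefixOf (c :: rest) = false := by
          revert hp; cases phL.isPrefixOf (c :: rest) <;> simp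
        rw [splitOn_go_neg fuel c rest cur acc hp']
        rw [ih _ _ _ (by simp only [List.length_cons] at h; omega)]
        rw [mySplit_cons c rest hp', preH_preH]
        simp

theorem splitOn_eq (s : List Char) : PySem.Chars.splitOn s phL = mySplit s := by
  show PySem.Chars.splitOn.go phL (s.length + 1) s [] [] = _
  rw [splitOn_go_eq (s.length + 1) s [] [] (by omega)]
  obtain ⟨h0, t0, hX⟩ := mySplit_exists_cons s
  rw [hX]
  simp [preH]

theorem replace_go_zero (l acc : List Char) :
    PySem.Chars.replace.go phL [] 0 l acc = acc.reverse ++ l := by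
  rw [PySem.Chars.replace.go]

theorem replace_go_nil (fuel : Nat) (acc : List Char) :
    PySem.Chars.replace.go phL [] (fuel + 1) [] acc = acc.reverse := by
  simp [PySem.Chars.replace.go]

theorem replace_go_pos (fuel : Nat) (c : Char) (rest acc : List Char)
    (hp : phL.isPrefixOf (c :: rest) = true) :
    PySem.Chars.replace.go phL [] (fuel + 1) (c :: rest) acc
      = PySem.Chars.replace.go phL [] fuel ((c :: rest).drop phL.length) acc := by
  rw [PySem.Chars.replace.go]; simp [hp]

theorem replace_go_neg (fuel : Nat) (c : Char) (rest acc : List Char)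
    (hp : phL.isPrefixOf (c :: rest) = false) :
    PySem.Chars.replace.go phL [] (fuel + 1) (c :: rest) acc
      = PySem.Chars.replace.go phL [] fuel rest (c :: acc) := by
  rw [PySem.Chars.replace.go]; simp [hp]

theorem replace_go_eq (fuel : Nat) : ∀ (l acc : List Char),
    l.length ≤ fuel →
    PySem.Chars.replace.go phL [] fuel l acc = acc.reverse ++ (mySplit l).flatten := by
  induction fuel with
  | zero =>
    intro l acc h
    have hl : l = [] := List.length_eq_zero_iff.mp (by omega)
    subst hl
    rw [replace_go_zero]
    rw [mySplit_neg [] find_nil_phL]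
    simp
  | succ fuel ih =>
    intro l acc h
    match l with
    | [] =>
      rw [replace_go_nil]
      rw [mySplit_neg [] find_nil_phL]
      simp
    | c :: rest =>
      by_cases hp : phL.isPrefixOf (c :: rest) = true
      · rw [replace_go_pos fuel c rest acc hp]
        rw [ih _ _ (by
          simp only [List.length_drop, phL_len, List.length_cons]
          simp only [List.length_cons] at h
          omega)]
        rw [mySplit_pos _ 0 (find_prefix_zero c rest hp)]
        rw [phL_len]
        simp only [List.take_zero, Nat.zero_add]
        simp
      · have hp' : phL.isPrefixOf (c :: rest) = false := by
          revert hp; cases phL.isPrefixOf (c :: rest) <;> simp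
        rw [replace_go_neg fuel c rest acc hp']
        rw [ih _ _ (by simp only [List.length_cons] at h; omega)]
        rw [mySplit_cons c rest hp']
        obtain ⟨h0, t0, hX⟩ := mySplit_exists_cons rest
        rw [hX]
        simp [preH]

theorem replace_eq (s : List Char) :
    PySem.Chars.replace s phL [] = (mySplit s).flatten := by
  rw [PySem.Chars.replace]
  rw [if_neg (by decide)]
  exact replace_go_eq s.length s [] (le_refl _)

-- splitting after a clean prefix
theorem split_append_clean (pre b : List Char) (hc : CleanPre pre) :
    mySplit (pre ++ b) = preH pre (mySplit b) := by
  by_cases hb : PySem.Chars.find b phL = -1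
  · have hall : PySem.Chars.find (pre ++ b) phL = -1 := by
      rw [noocc_iff]
      intro i
      rcases Nat.lt_or_ge i pre.length with hi | hi
      · exact clean_no_start hc b i hi
      · rw [drop_app_ge pre b i hi]
        exact (noocc_iff b).mp hb _
    rw [mySplit_neg _ hall, mySplit_neg _ hb]
    simp [preH]
  · obtain ⟨hjp, hjm⟩ := find_decomp b hb
    set j := (PySem.Chars.find b phL).toNat with hjdef
    have hjl : j ≤ b.length := by
      have h2 := PySem.Chars.find_le_length b phL
      have h1 := PySem.Chars.neg_one_le_find b phL
      omega
    have hdec : b = b.take j ++ phL ++ b.drop (j + 14) := prefix_drop_decomp b j hjp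
    have hdec' : pre ++ b = (pre ++ b.take j) ++ phL ++ b.drop (j + 14) := by
      conv_lhs => rw [hdec]
      simp [List.append_assoc]
    have hfind : PySem.Chars.find (pre ++ b) phL = ((pre.length + j : Nat) : Int) := by
      have := find_at (pre ++ b.take j) (b.drop (j + 14)) (pre ++ b) hdec'
        (by
          intro i hilt
          have hlen : (pre ++ b.take j).length = pre.length + j := by
            simp [List.length_take, Nat.min_eq_left hjl]
          rw [hlen] at hilt
          rcases Nat.lt_or_ge i pre.length with hi | hi
          · exact clean_no_start hc b i hi
          · rw [drop_app_ge pre b i hi]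
            exact hjm (i - pre.length) (by omega))
      have hlen : (pre ++ b.take j).length = pre.length + j := by
        simp [List.length_take, Nat.min_eq_left hjl]
      rw [hlen] at this
      exact this
    rw [mySplit_pos _ _ hfind]
    have htake : (pre ++ b).take (pre.length + j) = pre ++ b.take j :=
      List.take_length_add_append j
    have hdrop : (pre ++ b).drop (pre.length + j + 14) = b.drop (j + 14) := by
      rw [show pre.length + j + 14 = pre.length + (j + 14) from by omega]
      exact List.drop_length_add_append (j + 14)
    rw [htake, hdrop]
    have hbfind : PySem.Chars.find b phL = (j : Int) := by
      have h1 := PySem.Chars.neg_one_le_find b phL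
      rw [hjdef]; omega
    rw [mySplit_pos b j hbfind]
    simp [preH]

-- fill loop lemmas
theorem fill_extract (rest : List (List Char)) : ∀ (x y : List Char) (rf : List (List Char)),
    (rest.foldl fillStep (x ++ y, rf)).1 = x ++ (rest.foldl fillStep (y, rf)).1 := by
  induction rest with
  | nil => intro x y rf; rfl
  | cons seg t ih =>
    intro x y rf
    cases rf with
    | nil =>
      show (t.foldl fillStep ((x ++ y) ++ seg, [])).1 = x ++ (t.foldl fillStep (y ++ seg, [])).1
      rw [List.append_assoc]
      exact ih x (y ++ seg) []
    | cons r rt =>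
      show (t.foldl fillStep ((x ++ y) ++ r ++ seg, rt)).1
          = x ++ (t.foldl fillStep (y ++ r ++ seg, rt)).1
      rw [List.append_assoc, List.append_assoc, ← List.append_assoc y]
      exact ih x (y ++ r ++ seg) rt

theorem fill_nil_refs_aux (rest : List (List Char)) : ∀ s0,
    (rest.foldl fillStep (s0, ([] : List (List Char)))).1 = s0 ++ rest.flatten := by
  induction rest with
  | nil => intro s0; simp
  | cons seg t ih =>
    intro s0
    show (t.foldl fillStep (s0 ++ seg, [])).1 = _
    rw [ih (s0 ++ seg)]
    simp [List.append_assoc]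

theorem fill_nil_refs (segs : List (List Char)) : fillB segs [] = segs.flatten := by
  cases segs with
  | nil => rfl
  | cons s0 rest =>
    show (rest.foldl fillStep (s0, [])).1 = _
    rw [fill_nil_refs_aux]
    simp

theorem fill_cons_cons (a b0 : List Char) (bt : List (List Char)) (r : List Char)
    (rs : List (List Char)) :
    fillB (a :: b0 :: bt) (r :: rs) = a ++ r ++ fillB (b0 :: bt) rs := by
  show (bt.foldl fillStep (a ++ r ++ b0, rs)).1 = a ++ r ++ (bt.foldl fillStep (b0, rs)).1
  exact fill_extract bt (a ++ r) b0 rs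

theorem fill_preH (x : List Char) (h0 : List Char) (t : List (List Char))
    (rf : List (List Char)) :
    fillB (preH x (h0 :: t)) rf = x ++ fillB (h0 :: t) rf := by
  show (t.foldl fillStep (x ++ h0, rf)).1 = x ++ (t.foldl fillStep (h0, rf)).1
  exact fill_extract t x h0 rf

-- A-side loop reshaping
theorem foldl_guard {α β γ : Type} (l : List α) (c : α → Bool) (f : α → γ)
    (g : β → γ → β) : ∀ s : β,
    l.foldl (fun m x => if c x then g m (f x) else m) s = ((l.filter c).map f).foldl g s := by
  induction l with
  | nil => intro s; rfl
  | cons x t ih =>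
    intro s
    by_cases hx : c x
    · simp [hx, ih]
    · simp [hx, ih]

theorem replace1_noocc (s r : List Char) (h : PySem.Chars.find s phL = -1) :
    replace1 s r = s := by
  simp [replace1, h]

def OkRef (r : List Char) : Prop := (∃ v u : String, r = refL v u) ∧ ¬ phL <:+: r

-- THE MAIN LEMMA: sequential first-occurrence replacement + strip-all equals split/fill
theorem main_fill (refs : List (List Char)) : ∀ s : List Char,
    (∀ r ∈ refs, OkRef r) →
    (mySplit (refs.foldl replace1 s)).flatten = fillB (mySplit s) refs := by
  induction refs with
  | nil =>
    intro s _
    rw [fill_nil_refs]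
    rfl
  | cons r rs ih =>
    intro s hok
    by_cases hf : PySem.Chars.find s phL = -1
    · have h1 : (r :: rs).foldl replace1 s = rs.foldl replace1 s := by
        simp [List.foldl_cons, replace1_noocc s r hf]
      rw [h1, ih s (fun r' hr' => hok r' (List.mem_cons_of_mem _ hr'))]
      rw [mySplit_neg s hf]
      rfl
    · obtain ⟨hjp, hjm⟩ := find_decomp s hf
      set j := (PySem.Chars.find s phL).toNat with hjdef
      have hjl : j ≤ s.length := by
        have h2 := PySem.Chars.find_le_length s phL
        have h1 := PySem.Chars.neg_one_le_find s phL
        omega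
      have hsfind : PySem.Chars.find s phL = (j : Int) := by
        have h1 := PySem.Chars.neg_one_le_find s phL
        rw [hjdef]; omega
      set a := s.take j with hadef
      set b := s.drop (j + 14) with hbdef
      have halen : a.length = j := by
        rw [hadef]; simp [List.length_take, Nat.min_eq_left hjl]
      have hdec : s = a ++ phL ++ b := prefix_drop_decomp s j hjp
      have hrepl : replace1 s r = a ++ r ++ b := by
        show (if PySem.Chars.find s phL = -1 then s
          else s.take (PySem.Chars.find s phL).toNat ++ r
            ++ s.drop ((PySem.Chars.find s phL).toNat + phL.length)) = a ++ r ++ b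
        rw [if_neg hf, phL_len, ← hjdef, ← hadef, ← hbdef]
      have hamin : ∀ i < a.length, ¬ phL <+: a.drop i := by
        intro i hi hpre
        refine hjm i (by omega) ?_
        have hsd : s.drop i = a.drop i ++ (phL ++ b) := by
          conv_lhs => rw [hdec]
          rw [List.append_assoc]
          rw [List.drop_append_of_le_length (by omega)]
        rw [hsd]
        exact hpre.trans (List.prefix_append _ _)
      obtain ⟨⟨v, u, hvu⟩, hnin⟩ := hok r (List.mem_cons_self)
      have hclean : CleanPre (a ++ r) := by
        rw [hvu] at hnin ⊢
        exact cleanPre_append a v u hamin hnin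
      have hfold : (r :: rs).foldl replace1 s = rs.foldl replace1 (a ++ r ++ b) := by
        simp [List.foldl_cons, hrepl]
      rw [hfold, ih (a ++ r ++ b) (fun r' hr' => hok r' (List.mem_cons_of_mem _ hr'))]
      have hsp1 : mySplit (a ++ r ++ b) = preH (a ++ r) (mySplit b) :=
        split_append_clean (a ++ r) b hclean
      have hsp2 : mySplit s = a :: mySplit b := by
        rw [mySplit_pos s j hsfind, ← hadef, ← hbdef]
      obtain ⟨b0, bt, hX⟩ := mySplit_exists_cons b
      rw [hsp1, hsp2, hX, fill_preH, fill_cons_cons]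

theorem noocc_foldl (refs : List (List Char)) (s : List Char)
    (h : PySem.Chars.find s phL = -1) : refs.foldl replace1 s = s := by
  induction refs with
  | nil => rfl
  | cons r rs ih => simp [List.foldl_cons, replace1_noocc s r h, ih]

-- dict membership plumbing
theorem mem_items_insert {q : String × String} {k v : String}
    (d : PySem.Dict String String) (h : q ∈ (d.insert k v).items) :
    q ∈ d.items ∨ q = (k, v) := by
  unfold PySem.Dict.insert at h
  split at h
  · obtain ⟨p, hp, hq⟩ := List.mem_map.mp h
    by_cases hpk : (p.1 == k) = true
    · right; rw [if_pos hpk] at hq; exact hq.symm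
    · left; rw [if_neg hpk] at hq; exact hq ▸ hp
  · rcases List.mem_append.mp h with h1 | h1
    · exact Or.inl h1
    · right; simpa using h1

theorem mem_items_foldl (l : List (String × String)) :
    ∀ (d : PySem.Dict String String) (q : String × String),
    q ∈ (l.foldl (fun d q => d.insert q.1 q.2) d).items → q ∈ d.items ∨ q ∈ l := by
  induction l with
  | nil => intro d q h; exact Or.inl h
  | cons p t ih =>
    intro d q h
    rcases ih (d.insert p.1 p.2) q h with h1 | h1
    · rcases mem_items_insert d h1 with h2 | h2
      · exact Or.inl h2
      · right; rw [h2]; exact List.mem_cons_self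
    · right; exact List.mem_cons_of_mem _ h1

theorem mem_pvDict {l : List (String × String)} {q : String × String}
    (h : q ∈ (pvDict l).items) : q ∈ l := by
  rcases mem_items_foldl l (PySem.Dict.mk []) q h with h1 | h1
  · simp at h1
  · exact h1

theorem getD_mem (d : PySem.Dict String String) (k : String)
    (h : d.contains k = true) : (k, d.getD k "") ∈ d.items := by
  unfold PySem.Dict.contains at h
  obtain ⟨p, hp, hpk⟩ := List.any_eq_true.mp h
  unfold PySem.Dict.getD PySem.Dict.get?
  rcases hf : List.find? (fun p => p.1 == k) d.items with _ | p'
  · rw [List.find?_eq_none] at hf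
    exact absurd hpk (hf p hp)
  · have hpk' : p'.1 = k := by
      have := List.find?_some hf
      exact eq_of_beq this
    have hmem := List.mem_of_find?_eq_some hf
    rw [hf]
    simp only [Option.map_some, Option.getD_some]
    rw [← hpk']
    exact hmem

theorem refImg_eq (fn : String) : refImg fn = refL fn ("images/" ++ fn) := by
  simp [refImg, refL, List.append_assoc,
    show ("](images/".toList : List Char) = "](".toList ++ "images/".toList from rfl]

theorem pmwi_eq (md : String) (im : List (String × String))
    (hnd : ¬ (PySem.Str.isIn "<!-- image -->" md = true ∧ ∃ p ∈ im,
      PySem.Str.isIn "<!-- image -->" ("![" ++ p.2 ++ "](images/" ++ p.2 ++ ")") = true)) :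
    pmwi md im = pmwiB md im := by
  unfold pmwi pmwiB
  by_cases him : im.isEmpty
  · simp [him]
  · simp only [him, Bool.false_eq_true, if_false]
    have hmain :
        PySem.Chars.replace
          ((pvDict im).values.foldl (fun m fn => replace1 m (refImg fn)) md.toList) phL []
        = fillB (PySem.Chars.splitOn md.toList phL) ((pvDict im).values.map refImg) := by
      rw [replace_eq, splitOn_eq]
      rw [show (pvDict im).values.foldl (fun m fn => replace1 m (refImg fn)) md.toList
        = ((pvDict im).values.map refImg).foldl replace1 md.toList from
          List.foldl_map.symm]
      by_cases hIn : PySem.Chars.find md.toList phL = -1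
      · rw [noocc_foldl _ md.toList hIn, mySplit_neg _ hIn]
        simp [fillB]
      · have hmd : PySem.Str.isIn "<!-- image -->" md = true := by
          have hinf : phL <:+: md.toList := by
            have h1 := (noocc_iff md.toList).not.mp hIn
            push_neg at h1
            obtain ⟨i, hi⟩ := h1
            exact List.infix_iff_prefix_suffix.mpr ⟨_, hi, List.drop_suffix _ _⟩
          rw [PySem.Str.isIn_iff_infix]
          exact hinf
        have hok : ∀ r ∈ (pvDict im).values.map refImg, OkRef r := by
          intro r hr
          obtain ⟨fn, hfn, hq⟩ := List.mem_map.mp hr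
          refine ⟨⟨fn, "images/" ++ fn, by rw [← hq, refImg_eq]⟩, ?_⟩
          intro hin
          obtain ⟨p, hp, hp2⟩ := List.mem_map.mp
            (show fn ∈ (pvDict im).items.map (fun p => p.2) from hfn)
          refine hnd ⟨hmd, p, mem_pvDict hp, ?_⟩
          have htl : ("![" ++ p.2 ++ "](images/" ++ p.2 ++ ")").toList = refImg p.2 := by
            simp [refImg, String.toList_append]
          rw [PySem.Str.isIn_iff_infix, htl, hp2]
          rw [← hq] at hin
          exact hin
        exact main_fill _ md.toList hok
    rw [hmain]

-- ===== VERDICT (by name: the statement is the Claim_ definition above) =====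
theorem process_markdown_with_s3_images_spec : Claim_equal_process_markdown_with_s3_images := by
  intro md im s3 _ hND
  unfold Spec_process_markdown_with_s3_images
  unfold process_markdown_with_s3_images process_markdown_with_s3_images_alt
  by_cases h3 : s3.isEmpty
  · have hs3 : s3 = [] := by simpa [List.isEmpty_iff] using h3
    simp only [h3, if_true]
    refine pmwi_eq md im ?_
    rintro ⟨hmd, hex⟩
    exact hND ⟨hmd, Or.inr ⟨hs3, hex⟩⟩
  · simp only [h3, Bool.false_eq_true, if_false]
    have hmain :
        PySem.Chars.replace
          ((pvDict im).items.foldl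
            (fun m q => if (pvDict s3).contains q.2 then replace1 m (refL q.2 ((pvDict s3).getD q.2 "")) else m)
            md.toList) phL []
        = fillB (PySem.Chars.splitOn md.toList phL)
            (((pvDict im).values.filter (fun v => (pvDict s3).contains v)).map
              (fun v => refL v ((pvDict s3).getD v ""))) := by
      rw [foldl_guard ((pvDict im).items) (fun q => (pvDict s3).contains q.2)
        (fun q => refL q.2 ((pvDict s3).getD q.2 "")) replace1 md.toList]
      rw [replace_eq, splitOn_eq]
      have hrefs :
          ((pvDict im).values.filter (fun v => (pvDict s3).contains v)).map
              (fun v => refL v ((pvDict s3).getD v ""))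
            = (((pvDict im).items.filter (fun q => (pvDict s3).contains q.2)).map
              (fun q => refL q.2 ((pvDict s3).getD q.2 ""))) := by
        show ((((pvDict im).items.map (fun p => p.2)).filter
            (fun v => (pvDict s3).contains v)).map (fun v => refL v ((pvDict s3).getD v "")))
          = _
        rw [List.filter_map, List.map_map]
        rfl
      rw [hrefs]
      set refsA := (((pvDict im).items.filter (fun q => (pvDict s3).contains q.2)).map
        (fun q => refL q.2 ((pvDict s3).getD q.2 ""))) with hrA
      by_cases hIn : PySem.Chars.find md.toList phL = -1
      · rw [noocc_foldl refsA md.toList hIn, mySplit_neg _ hIn]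
        simp [fillB]
      · have hmd : PySem.Str.isIn "<!-- image -->" md = true := by
          have : phL <:+: md.toList := by
            have := (noocc_iff md.toList).not.mp hIn
            push_neg at this
            obtain ⟨i, hi⟩ := this
            exact List.infix_iff_prefix_suffix.mpr ⟨_, hi, List.drop_suffix _ _⟩
          rw [PySem.Str.isIn_iff_infix]
          exact this
        have hND2 : ¬ ∃ p ∈ im, ∃ q ∈ s3, q.1 = p.2 ∧
            PySem.Str.isIn "<!-- image -->" ("![" ++ p.2 ++ "](" ++ q.2 ++ ")") = true := by
          intro hex
          exact hND ⟨hmd, Or.inl hex⟩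
        have hok : ∀ r ∈ refsA, OkRef r := by
          intro r hr
          rw [hrA] at hr
          obtain ⟨q, hqf, hq⟩ := List.mem_map.mp hr
          obtain ⟨hqmem, hqc⟩ := List.mem_filter.mp hqf
          refine ⟨⟨q.2, (pvDict s3).getD q.2 "", hq.symm⟩, ?_⟩
          intro hin
          refine hND2 ⟨q, mem_pvDict hqmem,
            (q.2, (pvDict s3).getD q.2 ""), mem_pvDict (getD_mem _ _ (by simpa using hqc)),
            rfl, ?_⟩
          have htl : ("![" ++ q.2 ++ "](" ++ (pvDict s3).getD q.2 "" ++ ")").toList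
              = refL q.2 ((pvDict s3).getD q.2 "") := by
            simp [refL, String.toList_append]
          rw [PySem.Str.isIn_iff_infix, htl]
          rw [← hq] at hin
          exact hin
        exact main_fill refsA md.toList hok
    rw [hmain]
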